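-- pv_equiv track=rewrite | github.com/Drahlous/computer_knowledge_database | data_structures_and_algorithms/greedy_algorithms/greedy_scheduling/python/greedy_scheduling.py | get_next_valid_earliest
-- ===== SOURCE A (Python) =====
-- def get_next_valid_earliest(remaining_events, previous_end_time):
--     next_earliest = None
--
--     for event, times in list(remaining_events.items()):
--         start = times["start"]
--         end = times["end"]
--
--         # It's too late to take this item, it begins before the previous event is finished
--         if start < previous_end_time:
--             remaining_events.pop(event)
--         elif next_earliest is None or end < remaining_events[next_earliest]["end"]:
--                 next_earliest = event
--
--     return next_earliest
-- ===== SOURCE B (Python) =====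
-- def get_next_valid_earliest(remaining_events, previous_end_time):
--     # Pass 1: collect the keys of events that start too early, then prune them.
--     to_remove = [event for event, times in remaining_events.items()
--                  if times["start"] < previous_end_time]
--     for event in to_remove:
--         remaining_events.pop(event)
--     # Pass 2: earliest-ending remaining event (first wins on ties), or None.
--     return min(remaining_events,
--                key=lambda event: remaining_events[event]["end"],
--                default=None)
-- ===== Notes on version B (the rewrite author's own statement) =====
-- stated objective: idiomatic
-- what changed: A's single interleaved loop (prune-and-track-min with a dict lookup per comparison) is replaced by two separate passes: first collect and pop the too-early events, then pick the earliest-ending survivor with min(..., key=..., default=None).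
import Mathlib
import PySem

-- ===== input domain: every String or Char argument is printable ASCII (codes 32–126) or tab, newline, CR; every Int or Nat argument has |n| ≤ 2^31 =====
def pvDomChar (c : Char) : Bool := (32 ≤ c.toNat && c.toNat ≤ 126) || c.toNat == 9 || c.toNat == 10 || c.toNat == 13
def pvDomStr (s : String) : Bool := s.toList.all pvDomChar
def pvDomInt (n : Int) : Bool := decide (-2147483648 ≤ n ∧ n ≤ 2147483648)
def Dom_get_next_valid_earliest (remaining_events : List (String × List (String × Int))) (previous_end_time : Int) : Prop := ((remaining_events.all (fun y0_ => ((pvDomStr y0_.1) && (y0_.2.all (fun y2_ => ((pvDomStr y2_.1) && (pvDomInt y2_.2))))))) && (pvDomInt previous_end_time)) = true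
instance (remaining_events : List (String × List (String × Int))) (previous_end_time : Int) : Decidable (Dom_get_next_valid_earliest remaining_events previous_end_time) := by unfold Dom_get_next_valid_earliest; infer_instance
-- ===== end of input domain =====

-- B splits A's single interleaved loop into two passes (collect-then-prune, then min(..., key=..., default=None));
-- equivalence is about the RETURN value; both A and B also pop the pruned keys from the argument dict in place.

-- ===== PORT A =====
-- the body of A's for-loop, acting on the state (current dict, next_earliest)
def pvAStep (previous_end_time : Int)
    (st : PySem.Dict String (List (String × Int)) × Option String)
    (p : String × List (String × Int)) :
    PySem.Dict String (List (String × Int)) × Option String :=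
  match (PySem.Dict.mk p.2).get? "start", (PySem.Dict.mk p.2).get? "end" with
  | some start, some e =>
    if start < previous_end_time then
      (st.1.erase p.1, st.2)                -- remaining_events.pop(event)
    else
      match st.2 with
      | none => (st.1, some p.1)            -- next_earliest is None
      | some k =>
        match (st.1.get? k).bind (fun t => (PySem.Dict.mk t).get? "end") with
        | some ek => if e < ek then (st.1, some p.1) else st
        | none => st                        -- Python raises KeyError here; excluded by Pre_
  | _, _ => st                              -- Python raises KeyError (missing "start"/"end"); excluded by Pre_

def get_next_valid_earliest (remaining_events : List (String × List (String × Int))) (previous_end_time : Int) : Option String :=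
  (remaining_events.foldl (pvAStep previous_end_time) (PySem.Dict.mk remaining_events, none)).2

-- ===== PORT B =====
def get_next_valid_earliest_alt (remaining_events : List (String × List (String × Int))) (previous_end_time : Int) : Option String :=
  -- getD with a junk default is exact under Pre_ (every event carries "start"/"end"; Python raises outside it)
  let to_remove := ((PySem.Dict.mk remaining_events).items.filter
      (fun p => (PySem.Dict.mk p.2).getD "start" 0 < previous_end_time)).map Prod.fst
  let d := to_remove.foldl (fun d e => PySem.Dict.erase d e) (PySem.Dict.mk remaining_events)
  PySem.List.min? d.keys (fun e => (PySem.Dict.mk (d.getD e [])).getD "end" 0)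

-- ===== PRECONDITION & SPEC =====
-- Pre_ excludes (a) events whose inner dict lacks a "start" or "end" key — there Python A raises KeyError —
-- and (b) assoc-lists with duplicate event keys, which cannot arise from a real Python dict (the dict
-- conversion collapses them), so the ports' behaviour on them is an artifact of the list encoding.
def Pre_get_next_valid_earliest (remaining_events : List (String × List (String × Int))) (previous_end_time : Int) : Prop :=
  (remaining_events.map Prod.fst).Nodup ∧
  ∀ p ∈ remaining_events,
    ((PySem.Dict.mk p.2).get? "start").isSome ∧ ((PySem.Dict.mk p.2).get? "end").isSome
instance (remaining_events : List (String × List (String × Int))) (previous_end_time : Int) : Decidable (Pre_get_next_valid_earliest remaining_events previous_end_time) := by unfold Pre_get_next_valid_earliest; infer_instance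

def pvWitness_get_next_valid_earliest : (List (String × List (String × Int))) × Int :=
  ([("a", [("start", 0), ("end", 5)]), ("b", [("start", 2), ("end", 3)])], 1)

def Spec_get_next_valid_earliest (remaining_events : List (String × List (String × Int))) (previous_end_time : Int) (out : Option String) : Prop := out = get_next_valid_earliest_alt remaining_events previous_end_time
instance (remaining_events : List (String × List (String × Int))) (previous_end_time : Int) (out : Option String) : Decidable (Spec_get_next_valid_earliest remaining_events previous_end_time out) := by unfold Spec_get_next_valid_earliest; infer_instance

-- ===== CLAIM (what is proved, stated in full; the proofs are below) =====
def Claim_equal_get_next_valid_earliest : Prop := ∀ (remaining_events : List (String × List (String × Int))) (previous_end_time : Int), Dom_get_next_valid_earliest remaining_events previous_end_time → Pre_get_next_valid_earliest remaining_events previous_end_time → Spec_get_next_valid_earliest remaining_events previous_end_time (get_next_valid_earliest remaining_events previous_end_time)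

-- ===== LEMMAS AND PROOFS =====

-- proof-side vocabulary: which events survive the prune, and their "end" value
def pvKeep (prev : Int) (p : String × List (String × Int)) : Bool :=
  !decide ((PySem.Dict.mk p.2).getD "start" 0 < prev)
def pvEnd (p : String × List (String × Int)) : Int :=
  (PySem.Dict.mk p.2).getD "end" 0
-- the pure first-wins running minimum both sides reduce to
def pvMinStep (acc : Option (String × List (String × Int))) (p : String × List (String × Int)) :
    Option (String × List (String × Int)) :=
  match acc with
  | none => some p
  | some m => if pvEnd p < pvEnd m then some p else some m

theorem pv_find?_filter (t : List (String × List (String × Int))) (k k' : String) (h : k' ≠ k) :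
    t.find? (fun p => p.1 == k') = (t.filter (fun p => !p.1 == k)).find? (fun p => p.1 == k') := by
  induction t with
  | nil => rfl
  | cons x t ih =>
    by_cases hk' : x.1 = k'
    · rw [List.find?_cons_of_pos (by simp [hk']),
        List.filter_cons_of_pos (by simp only [hk', Bool.not_eq_eq_eq_not]; simpa using h),
        List.find?_cons_of_pos (by simp [hk'])]
    · by_cases hxk : x.1 = k
      · rw [List.find?_cons_of_neg (by simp [hk']), List.filter_cons_of_neg (by simp [hxk]), ih]
      · rw [List.find?_cons_of_neg (by simp [hk']), List.filter_cons_of_pos (by simp [hxk]),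
          List.find?_cons_of_neg (by simp [hk']), ih]

theorem pv_get?_erase_of_ne (d : PySem.Dict String (List (String × Int))) (k k' : String)
    (h : k' ≠ k) : (d.erase k).get? k' = d.get? k' := by
  obtain ⟨items⟩ := d
  simp only [PySem.Dict.erase, PySem.Dict.get?]
  rw [← pv_find?_filter items k k' h]

-- A's loop computes the first-wins minimum of the kept events
theorem pv_A_loop (prev : Int) (re : List (String × List (String × Int)))
    (hnd : (re.map Prod.fst).Nodup)
    (hkeys : ∀ p ∈ re, ((PySem.Dict.mk p.2).get? "start").isSome ∧ ((PySem.Dict.mk p.2).get? "end").isSome)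
    (l : List (String × List (String × Int))) (d : PySem.Dict String (List (String × Int)))
    (acc : Option (String × List (String × Int)))
    (hsub : ∀ p ∈ l, p ∈ re)
    (hd : ∀ p ∈ re, pvKeep prev p = true → d.get? p.1 = some p.2)
    (hacc : ∀ m, acc = some m → m ∈ re ∧ pvKeep prev m = true) :
    (l.foldl (pvAStep prev) (d, acc.map Prod.fst)).2 =
      ((l.filter (pvKeep prev)).foldl pvMinStep acc).map Prod.fst := by
  induction l generalizing d acc with
  | nil => rfl
  | cons p t ih =>
    have hpre : p ∈ re := hsub p (by simp)
    obtain ⟨hs, he⟩ := hkeys p hpre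
    obtain ⟨s, hs⟩ := Option.isSome_iff_exists.mp hs
    obtain ⟨e, he⟩ := Option.isSome_iff_exists.mp he
    have hkeep : pvKeep prev p = !decide (s < prev) := by
      simp [pvKeep, PySem.Dict.getD, hs]
    by_cases hlt : s < prev
    · -- pruned: the loop erases p.1, the reference drops p
      have hstep : pvAStep prev (d, acc.map Prod.fst) p = (d.erase p.1, acc.map Prod.fst) := by
        simp [pvAStep, hs, he, hlt]
      rw [List.foldl_cons, hstep, List.filter_cons, (by simp [hkeep, hlt] : pvKeep prev p = false)]
      simp only [Bool.false_eq_true, if_false]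
      refine ih (d.erase p.1) acc (fun q hq => hsub q (by simp [hq])) ?_ hacc
      intro q hq hkq
      have hne : q.1 ≠ p.1 := by
        intro hh
        have := List.inj_on_of_nodup_map hnd hq hpre hh
        subst this
        rw [hkq] at hkeep
        simp [hlt] at hkeep
      rw [pv_get?_erase_of_ne d p.1 q.1 hne]
      exact hd q hq hkq
    · -- kept
      have hkp : pvKeep prev p = true := by simp [hkeep, hlt]
      have hend : pvEnd p = e := by simp [pvEnd, PySem.Dict.getD, he]
      rw [List.foldl_cons, List.filter_cons, hkp]
      simp only [if_true]
      cases hacccase : acc with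
      | none =>
        have hstep : pvAStep prev (d, (Option.none (α := (String × List (String × Int)))).map Prod.fst) p = (d, some p.1) := by
          simp [pvAStep, hs, he, hlt]
        rw [hstep]
        have : (some p.1) = (some p).map Prod.fst := rfl
        rw [this]
        refine ih d (some p) (fun q hq => hsub q (by simp [hq])) hd ?_
        intro m hm; cases hm; exact ⟨hpre, hkp⟩
      | some m =>
        obtain ⟨hmre, hmk⟩ := hacc m hacccase
        obtain ⟨_, hme⟩ := hkeys m hmre
        obtain ⟨em, hme⟩ := Option.isSome_iff_exists.mp hme
        have hlookup : (d.get? m.1).bind (fun t => (PySem.Dict.mk t).get? "end") = some em := by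
          rw [hd m hmre hmk]; simpa using hme
        have hendm : pvEnd m = em := by simp [pvEnd, PySem.Dict.getD, hme]
        have hstep : pvAStep prev (d, (some m).map Prod.fst) p =
            (d, if e < em then some p.1 else some m.1) := by
          simp only [pvAStep, hs, he, hlt, if_false, Option.map_some, hlookup]
          split <;> rfl
        rw [hstep]
        by_cases hcmp : e < em
        · rw [if_pos hcmp]
          have : (some p.1) = (some p).map Prod.fst := rfl
          rw [this]
          have hms : pvMinStep (some m) p = some p := by simp [pvMinStep, hend, hendm, hcmp]
          rw [List.foldl_cons, hms]
          refine ih d (some p) (fun q hq => hsub q (by simp [hq])) hd ?_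
          intro x hx; cases hx; exact ⟨hpre, hkp⟩
        · rw [if_neg hcmp]
          have : (some m.1) = (some m).map Prod.fst := rfl
          rw [this]
          have hms : pvMinStep (some m) p = some m := by simp [pvMinStep, hend, hendm, hcmp]
          rw [List.foldl_cons, hms]
          refine ih d (some m) (fun q hq => hsub q (by simp [hq])) hd ?_
          intro x hx; cases hx; exact ⟨hmre, hmk⟩

-- folding erase over a list of keys filters the items
theorem pv_foldl_erase (K : List String) (d : PySem.Dict String (List (String × Int))) :
    (K.foldl (fun d e => PySem.Dict.erase d e) d).items =
      d.items.filter (fun p => !K.contains p.1) := by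
  induction K generalizing d with
  | nil => simp
  | cons k t ih =>
    rw [List.foldl_cons, ih]
    obtain ⟨items⟩ := d
    simp only [PySem.Dict.erase, List.filter_filter]
    refine List.filter_congr ?_
    intro p _
    by_cases hpk : p.1 = k <;> simp [hpk, Bool.and_comm]

-- the step of Python's min(..., key=g) over the key list, as a named function
def pvKeyStep (g : String → Int) (a : Option String) (x : String) : Option String :=
  match a with
  | none => some x
  | some m => if g x < g m then some x else some m

theorem pv_min?_eq_foldl_keyStep (xs : List String) (g : String → Int) :
    PySem.List.min? xs g = xs.foldl (pvKeyStep g) none := by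
  unfold PySem.List.min?
  congr 1
  funext a x
  cases a <;> rfl

-- B's min over keys is the first-wins minimum over the surviving items
theorem pv_B_fold (F : List (String × List (String × Int))) (g : String → Int)
    (hg : ∀ p ∈ F, g p.1 = pvEnd p) (acc : Option (String × List (String × Int)))
    (hacc : ∀ m, acc = some m → g m.1 = pvEnd m) :
    (F.map Prod.fst).foldl (pvKeyStep g) (acc.map Prod.fst) =
      (F.foldl pvMinStep acc).map Prod.fst := by
  induction F generalizing acc with
  | nil => rfl
  | cons p t ih =>
    have hgp : g p.1 = pvEnd p := hg p (by simp)
    have ht : ∀ q ∈ t, g q.1 = pvEnd q := fun q hq => hg q (by simp [hq])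
    cases hacccase : acc with
    | none =>
      simp only [List.map_cons, List.foldl_cons, Option.map_none]
      rw [(show pvKeyStep g none p.1 = (some p).map Prod.fst from rfl),
        (show pvMinStep none p = some p from rfl)]
      exact ih ht (some p) (by intro m hm; cases hm; exact hgp)
    | some m =>
      have hgm : g m.1 = pvEnd m := hacc m hacccase
      simp only [List.map_cons, List.foldl_cons, Option.map_some]
      by_cases hcmp : pvEnd p < pvEnd m
      · rw [(by simp [pvKeyStep, hgp, hgm, hcmp] : pvKeyStep g (some m.1) p.1 = some p.1),
          (by simp [pvMinStep, hcmp] : pvMinStep (some m) p = some p),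
          (show (some p.1 : Option String) = (some p).map Prod.fst from rfl)]
        exact ih ht (some p) (by intro x hx; cases hx; exact hgp)
      · rw [(by simp [pvKeyStep, hgp, hgm, hcmp] : pvKeyStep g (some m.1) p.1 = some m.1),
          (by simp [pvMinStep, hcmp] : pvMinStep (some m) p = some m),
          (show (some m.1 : Option String) = (some m).map Prod.fst from rfl)]
        exact ih ht (some m) (by intro x hx; cases hx; exact hgm)

-- ===== VERDICT (by name: the statement is the Claim_ definition above) =====
theorem get_next_valid_earliest_spec : Claim_equal_get_next_valid_earliest := by
  intro re prev _ hpre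
  obtain ⟨hnd, hkeys⟩ := hpre
  unfold Spec_get_next_valid_earliest
  -- A's side: the interleaved loop is the first-wins minimum of the kept events
  have hA : get_next_valid_earliest re prev =
      ((re.filter (pvKeep prev)).foldl pvMinStep none).map Prod.fst := by
    unfold get_next_valid_earliest
    have := pv_A_loop prev re hnd hkeys re (PySem.Dict.mk re) none (fun p hp => hp)
      (fun p hp _ => PySem.Dict.get?_of_mem_items (PySem.Dict.mk re) hp (by simpa using hnd))
      (by intro m hm; cases hm)
    simpa using this
  -- B's side
  set d2 := ((((PySem.Dict.mk re).items.filter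
      (fun p => (PySem.Dict.mk p.2).getD "start" 0 < prev)).map Prod.fst).foldl
        (fun d e => PySem.Dict.erase d e) (PySem.Dict.mk re)) with hd2def
  have hBdef : get_next_valid_earliest_alt re prev =
      PySem.List.min? d2.keys (fun e => (PySem.Dict.mk (d2.getD e [])).getD "end" 0) := rfl
  have hF : d2.items = re.filter (pvKeep prev) := by
    rw [hd2def, pv_foldl_erase]
    refine List.filter_congr ?_
    intro p hp
    by_cases hk : pvKeep prev p = true
    · rw [hk]
      simp only [Bool.not_eq_true', List.contains_eq_mem, decide_eq_false_iff_not]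
      intro hmem
      simp only [List.mem_map, List.mem_filter] at hmem
      obtain ⟨q, ⟨hq, hqlt⟩, hqk⟩ := hmem
      have hqp := List.inj_on_of_nodup_map hnd hq (by simpa using hp) hqk
      subst hqp
      simp only [pvKeep, Bool.not_eq_true', decide_eq_false_iff_not] at hk
      exact hk (by simpa using hqlt)
    · have hk' : pvKeep prev p = false := by simpa using hk
      rw [hk']
      simp only [Bool.not_eq_false', List.contains_eq_mem, decide_eq_true_eq]
      refine List.mem_map_of_mem ?_
      refine List.mem_filter.mpr ⟨by simpa using hp, ?_⟩
      simp only [pvKeep] at hk'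
      simpa using hk'
  have hkeysF : d2.keys = (re.filter (pvKeep prev)).map Prod.fst := by
    simp only [PySem.Dict.keys, hF]
  have hndF : d2.keys.Nodup := by
    rw [hkeysF]
    exact hnd.sublist (List.filter_sublist.map Prod.fst)
  have hg : ∀ p ∈ re.filter (pvKeep prev),
      (PySem.Dict.mk (d2.getD p.1 [])).getD "end" 0 = pvEnd p := by
    intro p hp
    have hpi : (p.1, p.2) ∈ d2.items := by rw [hF]; simpa using hp
    rw [PySem.Dict.getD_of_mem_items d2 hpi hndF]
    rfl
  rw [hA, hBdef, hkeysF, pv_min?_eq_foldl_keyStep]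
  have hfold := pv_B_fold (re.filter (pvKeep prev))
    (fun e => (PySem.Dict.mk (d2.getD e [])).getD "end" 0) hg none
    (by intro m hm; cases hm)
  simpa using hfold.symm
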